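-- pv_equiv track=rewrite | github.com/DavidBrocardo/Modelador-para-superficies-3D-usando-B-Splines | ProjecaoAxonometrica.py | converter_vertices
-- ===== SOURCE A (Python) =====
-- def converter_vertices(lista_vertices):
--     vertices_covertido = [[], [], [],[]]
--     for linha in lista_vertices:
--         for item in linha:
--             x, y, z = item
--             vertices_covertido[0].append(x)
--             vertices_covertido[1].append(y)
--             vertices_covertido[2].append(z)
--             vertices_covertido[3].append(1)
--     return vertices_covertido
-- ===== SOURCE B (Python) =====
-- def converter_vertices(lista_vertices):
--     # Staged passes: each output row comes from its own traversal of the input,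
--     # instead of one loop appending to four columns at once.
--     def coluna(k):
--         return [item[k] for linha in lista_vertices for item in linha]
--     n = sum(len(linha) for linha in lista_vertices)
--     return [coluna(0), coluna(1), coluna(2), [1] * n]
-- ===== Notes on version B (the rewrite author's own statement) =====
-- stated objective: alternative
-- what changed: B builds each output row in its own independent pass (one projection traversal per coordinate, plus a sum-of-lengths pass for the [1]*n homogeneous row), instead of A's single nested loop that appends to all four columns element by element.
import Mathlib
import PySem

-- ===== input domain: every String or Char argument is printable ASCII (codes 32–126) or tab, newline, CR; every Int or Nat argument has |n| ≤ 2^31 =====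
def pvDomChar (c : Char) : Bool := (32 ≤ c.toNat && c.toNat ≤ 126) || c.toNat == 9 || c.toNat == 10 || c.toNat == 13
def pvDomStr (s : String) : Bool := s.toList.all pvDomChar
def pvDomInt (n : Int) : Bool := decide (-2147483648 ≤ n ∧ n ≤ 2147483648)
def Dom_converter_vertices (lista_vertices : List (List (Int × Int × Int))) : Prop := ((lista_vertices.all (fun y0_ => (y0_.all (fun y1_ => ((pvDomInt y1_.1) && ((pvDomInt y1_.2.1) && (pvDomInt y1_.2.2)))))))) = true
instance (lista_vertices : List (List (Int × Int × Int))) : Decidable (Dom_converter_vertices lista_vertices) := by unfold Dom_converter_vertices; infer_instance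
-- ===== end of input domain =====

-- B builds each output row by an independent traversal (one projection pass per coordinate
-- plus a sum-of-lengths pass for the homogeneous row) instead of A's single nested loop
-- appending to all four columns at once (objective: alternative decomposition; same O(n)).

-- ===== PORT A =====
-- inner-loop body: unpack item as (x, y, z) and append x, y, z, 1 to the four columns
def convStepA (acc : List Int × List Int × List Int × List Int) (item : Int × Int × Int) :
    List Int × List Int × List Int × List Int :=
  (acc.1 ++ [item.1], acc.2.1 ++ [item.2.1], acc.2.2.1 ++ [item.2.2], acc.2.2.2 ++ [(1 : Int)])

def converter_vertices (lista_vertices : List (List (Int × Int × Int))) : List (List Int) :=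
  let r := lista_vertices.foldl (fun acc linha => linha.foldl convStepA acc) ([], [], [], [])
  [r.1, r.2.1, r.2.2.1, r.2.2.2]

-- ===== PORT B =====
-- coluna k: the nested comprehension [item[k] for linha in lista_vertices for item in linha]
def convColuna (lista_vertices : List (List (Int × Int × Int))) (sel : Int × Int × Int → Int) : List Int :=
  lista_vertices.flatMap (fun linha => linha.map sel)

def converter_vertices_alt (lista_vertices : List (List (Int × Int × Int))) : List (List Int) :=
  let n := (lista_vertices.map (fun linha => linha.length)).sum
  [convColuna lista_vertices (·.1), convColuna lista_vertices (·.2.1),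
   convColuna lista_vertices (·.2.2), List.replicate n (1 : Int)]

-- ===== PRECONDITION & SPEC =====
def Spec_converter_vertices (lista_vertices : List (List (Int × Int × Int))) (out : List (List Int)) : Prop := out = converter_vertices_alt lista_vertices
instance (lista_vertices : List (List (Int × Int × Int))) (out : List (List Int)) : Decidable (Spec_converter_vertices lista_vertices out) := by unfold Spec_converter_vertices; infer_instance

-- ===== CLAIM =====
def Claim_equal_converter_vertices : Prop := ∀ (lista_vertices : List (List (Int × Int × Int))), Dom_converter_vertices lista_vertices → Spec_converter_vertices lista_vertices (converter_vertices lista_vertices)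

-- ===== LEMMAS AND PROOFS =====
theorem foldl_convStepA (pts : List (Int × Int × Int)) (a b c d : List Int) :
    pts.foldl convStepA (a, b, c, d) =
      (a ++ pts.map (·.1), b ++ pts.map (·.2.1), c ++ pts.map (·.2.2),
       d ++ List.replicate pts.length (1 : Int)) := by
  induction pts generalizing a b c d with
  | nil => simp
  | cons p ps ih => simp [List.foldl_cons, convStepA, ih, List.replicate_succ]

theorem nested_foldl_eq (lista : List (List (Int × Int × Int))) (a b c d : List Int) :
    lista.foldl (fun acc linha => linha.foldl convStepA acc) (a, b, c, d) =
      (a ++ convColuna lista (·.1), b ++ convColuna lista (·.2.1),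
       c ++ convColuna lista (·.2.2),
       d ++ List.replicate ((lista.map (fun linha => linha.length)).sum) (1 : Int)) := by
  induction lista generalizing a b c d with
  | nil => simp [convColuna]
  | cons l ls ih =>
      simp only [List.foldl_cons, foldl_convStepA, ih, convColuna, List.flatMap_cons,
        List.map_cons, List.sum_cons, List.replicate_add, List.append_assoc]

-- ===== VERDICT =====
theorem converter_vertices_spec : Claim_equal_converter_vertices := by
  intro lista _
  unfold Spec_converter_vertices converter_vertices converter_vertices_alt
  rw [nested_foldl_eq lista [] [] [] []]
  simp
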